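-- pv_equiv track=rewrite | github.com/kenijiva/networking-under-uncertainty | scenarios.py | get_bad_scenarios
-- ===== SOURCE A (Python) =====
-- def get_bad_scenarios(possible_bad_scenarios, low_up):
--     bad_subset = []
--     for b in range(len(possible_bad_scenarios)):
--         new_bads = []
--         bad = sorted(possible_bad_scenarios[b][1], key=len)
--         while len(bad) > 0:
--             if low_up == 'low':
--                 new_bads.append(bad[-1])
--                 bad = [i for i in bad if not set(i).issubset(bad[-1])]
--             elif low_up == 'up':
--                 new_bads.append(bad[0])
--                 bad = [i for i in bad if not set(bad[0]).issubset(set(i))]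
--             else:
--                 raise Exception('This low_up is not defined')
--         bad_subset.append((possible_bad_scenarios[b][0], new_bads))
--     return bad_subset
-- ===== SOURCE B (Python) =====
-- def get_bad_scenarios(possible_bad_scenarios, low_up):
--     # One stable sort per scenario, then a single non-destructive pass keeping
--     # maximal ('low') / minimal ('up') sets; candidates are checked against the
--     # already-kept elements instead of repeatedly filtering the remaining list.
--     result = []
--     for sid, fam in possible_bad_scenarios:
--         ordered = sorted(fam, key=len)
--         if low_up == 'low':
--             ordered.reverse()
--         kept = []
--         for s in ordered:
--             if low_up == 'low':
--                 if not any(set(s).issubset(k) for k in kept):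
--                     kept.append(s)
--             elif low_up == 'up':
--                 if not any(set(k).issubset(set(s)) for k in kept):
--                     kept.append(s)
--             else:
--                 raise Exception('This low_up is not defined')
--         result.append((sid, kept))
--     return result
-- ===== Notes on version B (the rewrite author's own statement) =====
-- stated objective: simpler
-- what changed: Replaces A's destructive while-loop that repeatedly rebuilds the remaining list by filtering against the element just picked with one stable sort per scenario followed by a single non-destructive pass that keeps a candidate only if it is not dominated by an already-kept set.
import Mathlib
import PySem

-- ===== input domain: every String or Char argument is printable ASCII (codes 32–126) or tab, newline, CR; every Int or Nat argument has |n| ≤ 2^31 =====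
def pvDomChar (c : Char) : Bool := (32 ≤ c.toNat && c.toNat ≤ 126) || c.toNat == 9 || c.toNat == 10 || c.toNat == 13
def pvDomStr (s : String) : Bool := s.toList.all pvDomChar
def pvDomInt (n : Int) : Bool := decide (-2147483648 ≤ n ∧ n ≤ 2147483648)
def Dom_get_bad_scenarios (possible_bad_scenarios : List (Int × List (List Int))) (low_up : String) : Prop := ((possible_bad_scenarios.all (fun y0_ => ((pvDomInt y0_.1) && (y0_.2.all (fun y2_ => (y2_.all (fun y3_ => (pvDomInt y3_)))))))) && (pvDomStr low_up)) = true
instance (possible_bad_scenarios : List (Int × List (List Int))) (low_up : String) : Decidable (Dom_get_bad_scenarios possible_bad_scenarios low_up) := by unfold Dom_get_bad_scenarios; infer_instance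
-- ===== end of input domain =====

-- B replaces A's destructive filter-the-remaining-list while-loop by one stable sort plus a single
-- pass that checks each candidate against the already-kept sets (objective: simpler).

-- set(i).issubset(t)  (t may be any iterable; this call appears in both Pythons)
def pvSub (i t : List Int) : Bool := PySem.Set.issubset (PySem.Set.ofList i) t

theorem pvSub_self (x : List Int) : pvSub x x = true := by
  simp [pvSub, PySem.Set.issubset_iff, PySem.Set.mem_ofList]

-- termination facts for the port of A's while-loop (cited by name in decreasing_by)
theorem pvFilterLastLt (hd : List Int) (tl : List (List Int)) :
    ((hd :: tl).filter (fun i => !pvSub i ((hd :: tl).getLast (by simp)))).length < (hd :: tl).length := by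
  apply List.length_filter_lt_length_iff_exists.mpr
  exact ⟨(hd :: tl).getLast (by simp), List.getLast_mem _, by simp [pvSub_self]⟩

theorem pvFilterHeadLt (hd : List Int) (tl : List (List Int)) :
    ((hd :: tl).filter (fun i => !pvSub hd i)).length < (hd :: tl).length := by
  apply List.length_filter_lt_length_iff_exists.mpr
  exact ⟨hd, by simp, by simp [pvSub_self]⟩

-- ===== PORT A =====
-- A's while-loop: append bad[-1] ('low') / bad[0] ('up'), then filter the remaining list
def aWhile (low_up : String) (bad : List (List Int)) (new_bads : List (List Int)) : List (List Int) :=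
  match bad with
  | [] => new_bads
  | hd :: tl =>
    if low_up == "low" then
      aWhile low_up ((hd :: tl).filter (fun i => !pvSub i ((hd :: tl).getLast (by simp))))
        (new_bads ++ [(hd :: tl).getLast (by simp)])
    else if low_up == "up" then
      aWhile low_up ((hd :: tl).filter (fun i => !pvSub hd i)) (new_bads ++ [hd])
    else new_bads   -- Python raises Exception here; excluded by Pre_get_bad_scenarios
termination_by bad.length
decreasing_by
  · exact pvFilterLastLt hd tl
  · exact pvFilterHeadLt hd tl

def get_bad_scenarios (possible_bad_scenarios : List (Int × List (List Int))) (low_up : String) : List (Int × List (List Int)) :=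
  possible_bad_scenarios.foldl
    (fun bad_subset p =>
      bad_subset ++ [(p.1, aWhile low_up (PySem.List.sorted p.2 (fun s => s.length) false) [])])
    []

-- ===== PORT B =====
-- B's inner for-loop: keep s unless it is dominated by an already-kept set
def bScan (low_up : String) (ordered : List (List Int)) (kept : List (List Int)) : List (List Int) :=
  match ordered with
  | [] => kept
  | s :: rest =>
    if low_up == "low" then
      if kept.any (fun k => pvSub s k) then bScan low_up rest kept
      else bScan low_up rest (kept ++ [s])
    else if low_up == "up" then
      if kept.any (fun k => pvSub k s) then bScan low_up rest kept
      else bScan low_up rest (kept ++ [s])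
    else kept   -- Python raises Exception here; excluded by Pre_get_bad_scenarios

def get_bad_scenarios_alt (possible_bad_scenarios : List (Int × List (List Int))) (low_up : String) : List (Int × List (List Int)) :=
  possible_bad_scenarios.foldl
    (fun result p =>
      result ++ [(p.1, bScan low_up
        (if low_up == "low" then (PySem.List.sorted p.2 (fun s => s.length) false).reverse
         else PySem.List.sorted p.2 (fun s => s.length) false) [])])
    []

-- ===== PRECONDITION & SPEC =====
-- Pre_ excludes exactly the inputs where A raises Exception('This low_up is not defined'):
-- a low_up other than 'low'/'up' while some scenario family is non-empty (B raises there too).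
def Pre_get_bad_scenarios (possible_bad_scenarios : List (Int × List (List Int))) (low_up : String) : Prop :=
  low_up = "low" ∨ low_up = "up" ∨ ∀ p ∈ possible_bad_scenarios, p.2 = ([] : List (List Int))
instance (possible_bad_scenarios : List (Int × List (List Int))) (low_up : String) : Decidable (Pre_get_bad_scenarios possible_bad_scenarios low_up) := by unfold Pre_get_bad_scenarios; infer_instance

def pvWitness_get_bad_scenarios : (List (Int × List (List Int))) × String :=
  ([(1, [[1], [1, 2], [3]])], "low")

def Spec_get_bad_scenarios (possible_bad_scenarios : List (Int × List (List Int))) (low_up : String) (out : List (Int × List (List Int))) : Prop := out = get_bad_scenarios_alt possible_bad_scenarios low_up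
instance (possible_bad_scenarios : List (Int × List (List Int))) (low_up : String) (out : List (Int × List (List Int))) : Decidable (Spec_get_bad_scenarios possible_bad_scenarios low_up out) := by unfold Spec_get_bad_scenarios; infer_instance

-- ===== CLAIM (what is proved, stated in full; the proofs are below) =====
def Claim_equal_get_bad_scenarios : Prop := ∀ (possible_bad_scenarios : List (Int × List (List Int))) (low_up : String), Dom_get_bad_scenarios possible_bad_scenarios low_up → Pre_get_bad_scenarios possible_bad_scenarios low_up → Spec_get_bad_scenarios possible_bad_scenarios low_up (get_bad_scenarios possible_bad_scenarios low_up)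

-- ===== LEMMAS AND PROOFS =====

-- proof-side abstraction of A's loop (cmp fixes the comparison direction)
def loopG (cmp : List Int → List Int → Bool) (l : List (List Int)) (acc : List (List Int)) : List (List Int) :=
  match l with
  | [] => acc
  | x :: r => loopG cmp (r.filter (fun i => !cmp i x)) (acc ++ [x])
termination_by l.length
decreasing_by
  simp only [List.length_unattach]
  exact Nat.lt_succ_of_le (le_trans (List.length_filter_le _ _) (by simp))

theorem loopG_nil (cmp : List Int → List Int → Bool) (acc : List (List Int)) : loopG cmp [] acc = acc := by
  rw [loopG.eq_def]

theorem loopG_cons (cmp : List Int → List Int → Bool) (x : List Int) (r acc : List (List Int)) :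
    loopG cmp (x :: r) acc = loopG cmp (r.filter (fun i => !cmp i x)) (acc ++ [x]) := by
  rw [loopG.eq_def]

-- proof-side abstraction of B's scan
def scanG (cmp : List Int → List Int → Bool) : List (List Int) → List (List Int) → List (List Int)
  | [], kept => kept
  | s :: rest, kept =>
    if kept.any (fun k => cmp s k) then scanG cmp rest kept else scanG cmp rest (kept ++ [s])

-- key step: one filter against the kept list = skipping dominated candidates during the scan
theorem loopG_filter_eq_scanG (cmp : List Int → List Int → Bool) :
    ∀ (r kept : List (List Int)),
      loopG cmp (r.filter (fun i => !kept.any (fun k => cmp i k))) kept = scanG cmp r kept := by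
  intro r
  induction r with
  | nil => intro kept; simp [loopG_nil, scanG]
  | cons s rest ih =>
    intro kept
    by_cases h : kept.any (fun k => cmp s k)
    · simp only [List.filter_cons, h, Bool.not_true, Bool.false_eq_true, if_false, scanG]
      exact ih kept
    · have hfalse : kept.any (fun k => cmp s k) = false := by simpa using h
      simp only [List.filter_cons, hfalse, Bool.not_false, if_true, scanG]
      rw [loopG_cons]
      have hpred : ∀ i : List Int,
          ((!cmp i s) && !kept.any (fun k => cmp i k)) = !(kept ++ [s]).any (fun k => cmp i k) := by
        intro i
        simp [List.any_append, Bool.not_or, Bool.and_comm]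
      calc loopG cmp ((rest.filter (fun i => !kept.any (fun k => cmp i k))).filter (fun i => !cmp i s)) (kept ++ [s])
          = loopG cmp (rest.filter (fun i => !(kept ++ [s]).any (fun k => cmp i k))) (kept ++ [s]) := by
            rw [List.filter_filter]
            congr 1
            exact List.filter_congr (fun i _ => hpred i)
        _ = scanG cmp rest (kept ++ [s]) := ih (kept ++ [s])

-- A's while-loop for 'low' is loopG on the reversed list (fuel induction on the length)
theorem aWhile_low : ∀ (n : Nat) (bad : List (List Int)), bad.length ≤ n → ∀ acc,
    aWhile "low" bad acc = loopG (fun i x => pvSub i x) bad.reverse acc := by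
  intro n
  induction n with
  | zero =>
    intro bad h acc
    have hb : bad = [] := List.length_eq_zero_iff.mp (Nat.le_zero.mp h)
    subst hb; simp [aWhile, loopG_nil]
  | succ n ih =>
    intro bad h acc
    match bad with
    | [] => simp [aWhile, loopG_nil]
    | hd :: tl =>
      have hne : hd :: tl ≠ [] := by simp
      set L := hd :: tl with hL
      set x := L.getLast hne with hx
      have hsplit : L.dropLast ++ [x] = L := List.dropLast_concat_getLast hne
      have hfx : (fun i => !pvSub i x) x = false := by simp [pvSub_self]
      have hfilter : L.filter (fun i => !pvSub i x) = L.dropLast.filter (fun i => !pvSub i x) := by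
        conv_lhs => rw [← hsplit]
        simp [List.filter_append, hfx]
      have hrev : L.reverse = x :: L.dropLast.reverse := by
        conv_lhs => rw [← hsplit]; simp
      have hlen : (L.dropLast.filter (fun i => !pvSub i x)).length ≤ n := by
        have h1 : (L.dropLast.filter (fun i => !pvSub i x)).length ≤ L.dropLast.length :=
          List.length_filter_le _ _
        have h2 : L.dropLast.length = tl.length := by simp [hL]
        have h3 : tl.length ≤ n := by
          have : L.length ≤ n + 1 := h
          simp [hL] at this; omega
        omega
      rw [aWhile]
      rw [if_pos (show ("low" == "low") = true from rfl)]
      rw [hfilter, ih _ hlen, hrev, loopG_cons, List.filter_reverse]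

-- A's while-loop for 'up' is loopG on the list itself
theorem aWhile_up : ∀ (n : Nat) (bad : List (List Int)), bad.length ≤ n → ∀ acc,
    aWhile "up" bad acc = loopG (fun i x => pvSub x i) bad acc := by
  intro n
  induction n with
  | zero =>
    intro bad h acc
    have hb : bad = [] := List.length_eq_zero_iff.mp (Nat.le_zero.mp h)
    subst hb; simp [aWhile, loopG_nil]
  | succ n ih =>
    intro bad h acc
    match bad with
    | [] => simp [aWhile, loopG_nil]
    | hd :: tl =>
      have hfhd : (fun i => !pvSub hd i) hd = false := by simp [pvSub_self]
      have hfilter : (hd :: tl).filter (fun i => !pvSub hd i) = tl.filter (fun i => !pvSub hd i) := by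
        simp [hfhd]
      have hlen : (tl.filter (fun i => !pvSub hd i)).length ≤ n := by
        have h1 : (tl.filter (fun i => !pvSub hd i)).length ≤ tl.length := List.length_filter_le _ _
        have h3 : tl.length ≤ n := by simp at h; omega
        omega
      rw [aWhile]
      rw [if_neg (show ¬ (("up" == "low") = true) from by decide),
          if_pos (show ("up" == "up") = true from rfl)]
      rw [hfilter, ih _ hlen, loopG_cons]

theorem bScan_low : ∀ (r kept : List (List Int)),
    bScan "low" r kept = scanG (fun i x => pvSub i x) r kept := by
  intro r
  induction r with
  | nil => intro kept; simp [bScan, scanG]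
  | cons s rest ih =>
    intro kept
    rw [bScan, scanG]
    rw [if_pos (show ("low" == "low") = true from rfl)]
    by_cases hk : (kept.any fun k => pvSub s k) = true
    · rw [if_pos hk, if_pos hk]; exact ih kept
    · rw [if_neg hk, if_neg hk]; exact ih (kept ++ [s])

theorem bScan_up : ∀ (r kept : List (List Int)),
    bScan "up" r kept = scanG (fun i x => pvSub x i) r kept := by
  intro r
  induction r with
  | nil => intro kept; simp [bScan, scanG]
  | cons s rest ih =>
    intro kept
    rw [bScan, scanG]
    rw [if_neg (show ¬ (("up" == "low") = true) from by decide),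
        if_pos (show ("up" == "up") = true from rfl)]
    by_cases hk : (kept.any fun k => pvSub k s) = true
    · rw [if_pos hk, if_pos hk]; exact ih kept
    · rw [if_neg hk, if_neg hk]; exact ih (kept ++ [s])

-- per-scenario agreement
theorem perFam_eq (low_up : String) (fam : List (List Int))
    (hpre : low_up = "low" ∨ low_up = "up" ∨ fam = []) :
    aWhile low_up (PySem.List.sorted fam (fun s => s.length) false) [] =
      bScan low_up
        (if low_up == "low" then (PySem.List.sorted fam (fun s => s.length) false).reverse
         else PySem.List.sorted fam (fun s => s.length) false) [] := by
  rcases hpre with h | h | h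
  · subst h
    set S := PySem.List.sorted fam (fun s => s.length) false
    rw [aWhile_low S.length S le_rfl, bScan_low, ← loopG_filter_eq_scanG]
    simp
  · subst h
    set S := PySem.List.sorted fam (fun s => s.length) false
    simp only [show (("up" == "low") = false) by rfl, Bool.false_eq_true, if_false]
    rw [aWhile_up S.length S le_rfl, bScan_up, ← loopG_filter_eq_scanG]
    simp
  · subst h
    have hS : PySem.List.sorted ([] : List (List Int)) (fun s => s.length) false = [] := by
      simp [PySem.List.sorted_eq_nil_iff]
    rw [hS]
    simp only [List.reverse_nil, ite_self]
    rw [aWhile, bScan]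

-- ===== VERDICT (by name: the statement is the Claim_ definition above) =====
theorem get_bad_scenarios_spec : Claim_equal_get_bad_scenarios := by
  intro pbs low_up _hdom hpre
  unfold Spec_get_bad_scenarios get_bad_scenarios get_bad_scenarios_alt
  rw [PySem.List.foldl_append_singleton_eq_map, PySem.List.foldl_append_singleton_eq_map]
  simp only [List.nil_append]
  apply List.map_eq_map_iff.mpr
  intro p hp
  have hfam : low_up = "low" ∨ low_up = "up" ∨ p.2 = [] := by
    rcases hpre with h | h | h
    · exact Or.inl h
    · exact Or.inr (Or.inl h)
    · exact Or.inr (Or.inr (h p hp))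
  exact congrArg (fun l => (p.1, l)) (perFam_eq low_up p.2 hfam)
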